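-- pv_equiv track=rewrite | github.com/JoshuaSeth/SAT_solver | clause_learning.py | learn_clauses_from_conflicts
-- ===== SOURCE A (Python) =====
-- def learn_clauses_from_conflicts(conflicts):
--     """Returns the combination of variable assignments that has caused a conflict."""
--     learned_clauses = []
--     #Conflicts is a list of [var, [pos_clauses], [neg_clauses]]
--     for conflict in conflicts:
--         # Unpack elements of conflict
--         conflict_var = conflict[0]
--         pos_clauses = conflict[1]
--         neg_clauses = conflict[2]
--
--         learned_clauses_for_this_conflict = []
--
--         #Get a cartesian product of the positive and negative competing clauses (none of them is matching)
--         for pos_clause in pos_clauses: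
--             #And the negatives
--             for neg_clause in neg_clauses:
--                 learned_clause_cartesian_vars = []
--                 for var in pos_clause:
--                     learned_clause_cartesian_vars.append(var*-1)
--                 for var in neg_clause:
--                     learned_clause_cartesian_vars.append(var*-1)
--                 learned_clauses_for_this_conflict.append(learned_clause_cartesian_vars)
--
--
--         learned_clauses.extend(learned_clauses_for_this_conflict)
--     #Learned clauses shoulld be of form [[learned var combination], [learned_var_combination]]
--     return learned_clauses
-- ===== SOURCE B (Python) =====
-- def _pairs(pos_clauses, neg_clauses):
--     """Recursively build the raw (un-negated) concatenated pos+neg pairs."""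
--     if not pos_clauses:
--         return []
--     head = [pos_clauses[0] + n for n in neg_clauses]
--     return head + _pairs(pos_clauses[1:], neg_clauses)
--
-- def learn_clauses_from_conflicts(conflicts):
--     """Returns the combination of variable assignments that has caused a conflict."""
--     if not conflicts:
--         return []
--     _, pos_clauses, neg_clauses = conflicts[0]
--     negated = [[-v for v in pair] for pair in _pairs(pos_clauses, neg_clauses)]
--     return negated + learn_clauses_from_conflicts(conflicts[1:])
-- ===== Notes on version B (the rewrite author's own statement) =====
-- stated objective: alternative
-- what changed: B is recursive instead of loop-and-accumulate and stages the work differently: it first builds the raw concatenated pos+neg pair clauses per conflict and only then negates each whole pair in a single mapping pass, whereas A negates variable by variable inside the innermost pair loop.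
import Mathlib
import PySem

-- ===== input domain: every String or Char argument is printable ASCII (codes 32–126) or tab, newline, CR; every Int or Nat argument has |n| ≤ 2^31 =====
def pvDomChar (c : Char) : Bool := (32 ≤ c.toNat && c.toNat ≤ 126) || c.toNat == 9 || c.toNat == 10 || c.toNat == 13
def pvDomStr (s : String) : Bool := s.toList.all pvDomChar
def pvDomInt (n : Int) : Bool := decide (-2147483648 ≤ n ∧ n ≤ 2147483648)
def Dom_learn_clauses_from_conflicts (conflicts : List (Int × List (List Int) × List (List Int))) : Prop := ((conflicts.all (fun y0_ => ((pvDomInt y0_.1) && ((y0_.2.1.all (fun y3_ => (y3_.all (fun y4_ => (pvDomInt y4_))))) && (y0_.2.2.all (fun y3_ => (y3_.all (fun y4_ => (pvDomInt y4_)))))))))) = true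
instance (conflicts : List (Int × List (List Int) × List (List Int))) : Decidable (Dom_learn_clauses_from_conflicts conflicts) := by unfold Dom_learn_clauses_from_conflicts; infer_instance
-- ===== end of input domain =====

-- B recurses over the conflict list and stages the work as build-raw-pairs-then-negate, instead of A's accumulator loops with per-variable negation inside the innermost loop (objective: alternative decomposition, same cost).

-- ===== PORT A =====
def learn_clauses_from_conflicts (conflicts : List (Int × List (List Int) × List (List Int))) : List (List Int) :=
  conflicts.foldl (fun learned_clauses conflict =>
    let pos_clauses := conflict.2.1
    let neg_clauses := conflict.2.2
    let learned_clauses_for_this_conflict :=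
      pos_clauses.foldl (fun acc pos_clause =>
        neg_clauses.foldl (fun acc2 neg_clause =>
          let vars1 := pos_clause.foldl (fun vs v => vs ++ [v * -1]) []
          let vars2 := neg_clause.foldl (fun vs v => vs ++ [v * -1]) vars1
          acc2 ++ [vars2]) acc) []
    learned_clauses ++ learned_clauses_for_this_conflict) []

-- ===== PORT B =====
-- recursive raw-pair builder: concatenated (un-negated) pos+neg pairs
def pvPairs (pos_clauses neg_clauses : List (List Int)) : List (List Int) :=
  match pos_clauses with
  | [] => []
  | p :: rest => neg_clauses.map (fun n => p ++ n) ++ pvPairs rest neg_clauses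

def learn_clauses_from_conflicts_alt (conflicts : List (Int × List (List Int) × List (List Int))) : List (List Int) :=
  match conflicts with
  | [] => []
  | c :: rest =>
    let negated := (pvPairs c.2.1 c.2.2).map (fun pair => pair.map (fun v => -v))
    negated ++ learn_clauses_from_conflicts_alt rest

-- ===== PRECONDITION & SPEC =====
def Spec_learn_clauses_from_conflicts (conflicts : List (Int × List (List Int) × List (List Int))) (out : List (List Int)) : Prop := out = learn_clauses_from_conflicts_alt conflicts
instance (conflicts : List (Int × List (List Int) × List (List Int))) (out : List (List Int)) : Decidable (Spec_learn_clauses_from_conflicts conflicts out) := by unfold Spec_learn_clauses_from_conflicts; infer_instance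

-- ===== CLAIM (what is proved, stated in full; the proofs are below) =====
def Claim_equal_learn_clauses_from_conflicts : Prop := ∀ (conflicts : List (Int × List (List Int) × List (List Int))), Dom_learn_clauses_from_conflicts conflicts → Spec_learn_clauses_from_conflicts conflicts (learn_clauses_from_conflicts conflicts)

-- ===== LEMMAS AND PROOFS =====

-- A's per-variable append loop builds the negated clause appended to the accumulator.
theorem pv_vars_loop (c : List Int) (acc : List Int) :
    c.foldl (fun vs v => vs ++ [v * -1]) acc = acc ++ c.map (fun v => -v) := by
  induction c generalizing acc with
  | nil => simp
  | cons h t ih => simp only [List.foldl_cons, ih]; simp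

-- A's inner loop over neg_clauses produces the negated concatenated pairs for one pos clause.
theorem pv_neg_loop (p : List Int) (neg : List (List Int)) (a : List (List Int)) :
    neg.foldl (fun a2 n =>
      a2 ++ [n.foldl (fun vs v => vs ++ [v * -1]) (p.foldl (fun vs v => vs ++ [v * -1]) [])]) a
    = a ++ neg.map (fun n => (p ++ n).map (fun v => -v)) := by
  induction neg generalizing a with
  | nil => simp
  | cons n t iht =>
    simp only [List.foldl_cons]
    rw [iht, pv_vars_loop, pv_vars_loop]
    simp

-- A's double loop over one conflict equals B's negate-the-raw-pairs result, appended to the accumulator.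
theorem pv_conflict_loop (pos neg : List (List Int)) (acc : List (List Int)) :
    pos.foldl (fun a p =>
      neg.foldl (fun a2 n =>
        a2 ++ [n.foldl (fun vs v => vs ++ [v * -1]) (p.foldl (fun vs v => vs ++ [v * -1]) [])]) a) acc
    = acc ++ (pvPairs pos neg).map (fun pair => pair.map (fun v => -v)) := by
  induction pos generalizing acc with
  | nil => simp [pvPairs]
  | cons p rest ih =>
    simp only [List.foldl_cons, pvPairs, List.map_append, List.map_map]
    rw [ih, pv_neg_loop]
    simp [Function.comp]

theorem pv_fold_eq (conflicts : List (Int × List (List Int) × List (List Int))) (acc : List (List Int)) :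
    conflicts.foldl (fun learned_clauses conflict =>
      let pos_clauses := conflict.2.1
      let neg_clauses := conflict.2.2
      let learned_clauses_for_this_conflict :=
        pos_clauses.foldl (fun acc pos_clause =>
          neg_clauses.foldl (fun acc2 neg_clause =>
            let vars1 := pos_clause.foldl (fun vs v => vs ++ [v * -1]) []
            let vars2 := neg_clause.foldl (fun vs v => vs ++ [v * -1]) vars1
            acc2 ++ [vars2]) acc) []
      learned_clauses ++ learned_clauses_for_this_conflict) acc
    = acc ++ learn_clauses_from_conflicts_alt conflicts := by
  induction conflicts generalizing acc with
  | nil => simp [learn_clauses_from_conflicts_alt]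
  | cons c rest ih =>
    simp only [List.foldl_cons, learn_clauses_from_conflicts_alt]
    rw [ih, pv_conflict_loop]
    simp

-- ===== VERDICT (by name: the statement is the Claim_ definition above) =====
theorem learn_clauses_from_conflicts_spec : Claim_equal_learn_clauses_from_conflicts := by
  intro conflicts _
  unfold Spec_learn_clauses_from_conflicts learn_clauses_from_conflicts
  rw [pv_fold_eq]
  simp
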